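-- pv_equiv track=rewrite | github.com/viethoangmt22/1-Barkoder-Sumi | modules/classifier.py | classify_barcodes
-- ===== SOURCE A (Python) =====
-- from typing import Iterable, Dict, List
--
-- def classify_barcodes(barcodes: Iterable[str]) -> Dict[str, List[str]]:
--     """
--     Phân loại barcode, chỉ giữ lại P và Q lớn nhất, Batch giữ nguyên danh sách.
--     """
--     # Khởi tạo giá trị mặc định là None cho P và Q để dễ so sánh
--     max_p = None
--     max_q = None
--     batches = []
--     unknowns = []
--
--     for raw in barcodes:
--         if not raw:
--             continue
--
--         value = raw.strip()
--         prefix = value[0] if value else ""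
--         content = value[1:]
--
--         # Kiểm tra định dạng: Bắt đầu bằng P/Q/B và phần còn lại là số
--         if prefix in ("P", "Q", "B") and content.isdigit():
--             num_val = int(content) # Chuyển sang số để so sánh chính xác (ví dụ 1000 > 2)
--
--             if prefix == "P":
--                 # Nếu chưa có P nào hoặc P hiện tại lớn hơn P cũ thì cập nhật
--                 if max_p is None or num_val > int(max_p[1:]):
--                     max_p = value
--
--             elif prefix == "Q":
--                 # Tương tự cho Q
--                 if max_q is None or num_val > int(max_q[1:]):
--                     max_q = value
--
--             elif prefix == "B":
--                 # Batch thì vẫn lấy tất cả theo yêu cầu cũ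
--                 batches.append(value)
--         else:
--             # Không khớp định dạng thì cho vào UNKNOWN
--             unknowns.append(value)
--
--     # Tổng hợp kết quả trả về (ép P và Q vào List để đúng format yêu cầu)
--     return {
--         "P": [max_p] if max_p else [],
--         "Q": [max_q] if max_q else [],
--         "B": batches,
--         "UNKNOWN": unknowns
--     }
-- ===== SOURCE B (Python) =====
-- def classify_barcodes(barcodes):
--     # Pipeline: strip once, tag each value, then build each output list by filtering on the tag.
--     values = [raw.strip() for raw in barcodes if raw]
--
--     def tag(v):
--         return v[:1] if v[:1] in ("P", "Q", "B") and v[1:].isdigit() else "UNKNOWN"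
--
--     def best(items):
--         # max() keeps the first maximal element, matching A's strict-greater update rule
--         return [max(items, key=lambda v: int(v[1:]))] if items else []
--
--     return {
--         "P": best([v for v in values if tag(v) == "P"]),
--         "Q": best([v for v in values if tag(v) == "Q"]),
--         "B": [v for v in values if tag(v) == "B"],
--         "UNKNOWN": [v for v in values if tag(v) == "UNKNOWN"],
--     }
-- ===== Notes on version B (the rewrite author's own statement) =====
-- stated objective: alternative
-- what changed: A's single fused loop with running-max state is replaced by a declarative pipeline: strip+drop falsy once, tag every value by prefix/digit check, build each bucket by filtering on the tag, and reduce P/Q with max(key=int(v[1:])) whose first-maximal rule reproduces A's strict-greater earlier-wins tie behaviour.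
import Mathlib
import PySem

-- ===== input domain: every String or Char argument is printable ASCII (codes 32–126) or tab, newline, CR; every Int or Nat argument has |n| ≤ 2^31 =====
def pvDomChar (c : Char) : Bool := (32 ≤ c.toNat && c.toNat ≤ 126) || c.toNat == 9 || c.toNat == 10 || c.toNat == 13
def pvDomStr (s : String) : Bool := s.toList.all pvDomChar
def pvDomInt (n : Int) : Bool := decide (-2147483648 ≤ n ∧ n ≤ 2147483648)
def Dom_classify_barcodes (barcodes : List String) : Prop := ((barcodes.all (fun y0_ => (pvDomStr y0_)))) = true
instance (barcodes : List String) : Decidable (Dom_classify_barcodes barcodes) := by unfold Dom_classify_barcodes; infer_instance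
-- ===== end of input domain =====

-- B replaces A's fused running-max loop by a strip/tag/filter pipeline plus a max() reduce per prefix (objective: alternative decomposition).

-- int(v[1:]) ; both programs only evaluate it when v[1:].isdigit(), where ofStr? is some, so getD 0 is exact
def pvKey (v : String) : Int :=
  (PySem.Int.ofStr? (PySem.Str.slice v (some 1) none)).getD 0

-- ===== PORT A =====
-- value[0] if value else ""
def pvPrefix (value : String) : String :=
  match value.toList with
  | [] => ""
  | c :: _ => String.ofList [c]

def pvLoopA : List String → Option String × Option String × List String × List String →
    Option String × Option String × List String × List String
  | [], st => st
  | raw :: rest, (mp, mq, bs, us) =>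
    if raw = "" then pvLoopA rest (mp, mq, bs, us)   -- if not raw: continue
    else
      let value := PySem.Str.strip raw
      let pre := pvPrefix value
      let content := PySem.Str.slice value (some 1) none
      if (pre = "P" ∨ pre = "Q" ∨ pre = "B") ∧ PySem.Str.strIsdigit content then
        let num := (PySem.Int.ofStr? content).getD 0
        if pre = "P" then
          pvLoopA rest ((match mp with
            | none => some value
            | some m => if num > pvKey m then some value else some m), mq, bs, us)
        else if pre = "Q" then
          pvLoopA rest (mp, (match mq with
            | none => some value
            | some m => if num > pvKey m then some value else some m), bs, us)
        else
          pvLoopA rest (mp, mq, bs ++ [value], us)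
      else
        pvLoopA rest (mp, mq, bs, us ++ [value])

-- [max_p] if max_p else []  (Python truthiness: None or "" give [])
def pvOptList : Option String → List String
  | none => []
  | some m => if m = "" then [] else [m]

def classify_barcodes (barcodes : List String) : List (String × List String) :=
  match pvLoopA barcodes (none, none, [], []) with
  | (mp, mq, bs, us) => [("P", pvOptList mp), ("Q", pvOptList mq), ("B", bs), ("UNKNOWN", us)]

-- ===== PORT B =====
-- [raw.strip() for raw in barcodes if raw]
def pvVals (barcodes : List String) : List String :=
  (barcodes.filter (fun r => r ≠ "")).map PySem.Str.strip

-- tag(v) = v[:1] if v[:1] in ("P","Q","B") and v[1:].isdigit() else "UNKNOWN"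
def pvTag (v : String) : String :=
  let p := PySem.Str.slice v none (some 1)
  if (p = "P" ∨ p = "Q" ∨ p = "B") ∧ PySem.Str.strIsdigit (PySem.Str.slice v (some 1) none)
  then p else "UNKNOWN"

-- [max(items, key=lambda v: int(v[1:]))] if items else [] ; max-with-key ported as the
-- first-maximal fold (CPython's max keeps the first of equal keys) — exact
def pvBest (items : List String) : List String :=
  match items with
  | [] => []
  | h :: t => [t.foldl (fun acc v => if pvKey v > pvKey acc then v else acc) h]

def classify_barcodes_alt (barcodes : List String) : List (String × List String) :=
  let vals := pvVals barcodes
  [("P", pvBest (vals.filter (fun v => pvTag v = "P"))),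
   ("Q", pvBest (vals.filter (fun v => pvTag v = "Q"))),
   ("B", vals.filter (fun v => pvTag v = "B")),
   ("UNKNOWN", vals.filter (fun v => pvTag v = "UNKNOWN"))]

-- ===== PRECONDITION & SPEC =====
def Spec_classify_barcodes (barcodes : List String) (out : List (String × List String)) : Prop := out = classify_barcodes_alt barcodes
instance (barcodes : List String) (out : List (String × List String)) : Decidable (Spec_classify_barcodes barcodes out) := by unfold Spec_classify_barcodes; infer_instance

-- ===== CLAIM (what is proved, stated in full; the proofs are below) =====
def Claim_equal_classify_barcodes : Prop := ∀ (barcodes : List String), Dom_classify_barcodes barcodes → Spec_classify_barcodes barcodes (classify_barcodes barcodes)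

-- ===== LEMMAS AND PROOFS =====

-- v[:1] of B is the 'value[0] if value else ""' of A
lemma pvSlice01 (v : String) : PySem.Str.slice v none (some 1) = pvPrefix v := by
  unfold pvPrefix
  cases h : v.toList with
  | nil => simp [PySem.Str.slice, h, PySem.List.slice_to]
  | cons c t => simp [PySem.Str.slice, h, PySem.List.slice_to]

-- A's running maximum, as a fold over a bucket with an initial Option state
def pvFoldMax (m : Option String) (l : List String) : Option String :=
  l.foldl (fun acc v => match acc with
    | none => some v
    | some m => if pvKey v > pvKey m then some v else some m) m

-- the loop of A computes, per component, the fold of its tag-filtered bucket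
lemma pvLoopA_spec (bs : List String) (mp mq : Option String) (b u : List String) :
    pvLoopA bs (mp, mq, b, u) =
      (pvFoldMax mp ((pvVals bs).filter (fun v => pvTag v = "P")),
       pvFoldMax mq ((pvVals bs).filter (fun v => pvTag v = "Q")),
       b ++ (pvVals bs).filter (fun v => pvTag v = "B"),
       u ++ (pvVals bs).filter (fun v => pvTag v = "UNKNOWN")) := by
  induction bs generalizing mp mq b u with
  | nil => simp [pvLoopA, pvVals, pvFoldMax]
  | cons raw rest ih =>
    by_cases hr : raw = ""
    · simp only [pvLoopA, if_pos hr]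
      rw [ih]
      simp [pvVals, hr]
    · have hv : pvVals (raw :: rest) = PySem.Str.strip raw :: pvVals rest := by
        simp [pvVals, hr]
      simp only [pvLoopA, if_neg hr]
      set value := PySem.Str.strip raw with hval
      set pre := pvPrefix value with hpre
      set content := PySem.Str.slice value (some 1) none with hcon
      have htag : pvTag value =
          if (pre = "P" ∨ pre = "Q" ∨ pre = "B") ∧ PySem.Str.strIsdigit content
          then pre else "UNKNOWN" := by
        unfold pvTag
        rw [pvSlice01]
      by_cases hg : (pre = "P" ∨ pre = "Q" ∨ pre = "B") ∧ PySem.Str.strIsdigit content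
      · rw [if_pos hg]
        rw [if_pos hg] at htag
        by_cases hp : pre = "P"
        · rw [if_pos hp]
          have ht : pvTag value = "P" := by rw [htag, hp]
          rw [ih, hv]
          simp only [List.filter_cons, ht, String.reduceEq, decide_true, decide_false, if_true]
          rfl
        · rw [if_neg hp]
          by_cases hq : pre = "Q"
          · rw [if_pos hq]
            have ht : pvTag value = "Q" := by rw [htag, hq]
            rw [ih, hv]
            simp only [List.filter_cons, ht, String.reduceEq, decide_true, decide_false, if_true]
            rfl
          · rw [if_neg hq]
            have hb : pre = "B" := by
              rcases hg.1 with h | h | h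
              · exact absurd h hp
              · exact absurd h hq
              · exact h
            have ht : pvTag value = "B" := by rw [htag, hb]
            rw [ih, hv]
            simp only [List.filter_cons, ht, String.reduceEq, decide_true, decide_false, if_true]
            simp [List.append_assoc]
      · rw [if_neg hg]
        rw [if_neg hg] at htag
        rw [ih, hv]
        simp only [List.filter_cons, htag, String.reduceEq, decide_true, decide_false, if_true]
        simp [List.append_assoc]

-- pvFoldMax from a 'some' state is B's plain first-maximal fold
lemma pvFoldMax_some (t : List String) (a : String) :
    pvFoldMax (some a) t = some (t.foldl (fun acc v => if pvKey v > pvKey acc then v else acc) a) := by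
  induction t generalizing a with
  | nil => rfl
  | cons b t ih =>
    by_cases h : pvKey b > pvKey a
    · have e : pvFoldMax (some a) (b :: t) = pvFoldMax (some b) t := by
        simp only [pvFoldMax, List.foldl_cons, if_pos h]
      rw [e, ih, List.foldl_cons, if_pos h]
    · have e : pvFoldMax (some a) (b :: t) = pvFoldMax (some a) t := by
        simp only [pvFoldMax, List.foldl_cons, if_neg h]
      rw [e, ih, List.foldl_cons, if_neg h]

lemma pvFoldl_mem (t : List String) (a : String) :
    t.foldl (fun acc v => if pvKey v > pvKey acc then v else acc) a ∈ a :: t := by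
  induction t generalizing a with
  | nil => simp
  | cons b t ih =>
    simp only [List.foldl_cons]
    have h := ih (if pvKey b > pvKey a then b else a)
    rcases List.mem_cons.mp h with h | h
    · rw [h]; split_ifs <;> simp
    · simp [h]

-- a tagged-"P"/"Q" value is nonempty (the empty string tags as "UNKNOWN")
lemma pvTag_ne_empty (v : String) (t : String) (ht : pvTag v = t) (hne : t ≠ "UNKNOWN") : v ≠ "" := by
  intro hv; subst hv
  apply hne
  rw [← ht]
  decide

lemma pvOptList_foldMax (l : List String) (h : ∀ v ∈ l, v ≠ "") :
    pvOptList (pvFoldMax none l) = pvBest l := by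
  cases l with
  | nil => rfl
  | cons a t =>
    show pvOptList (pvFoldMax (some a) t) = _
    rw [pvFoldMax_some]
    have hm : (t.foldl (fun acc v => if pvKey v > pvKey acc then v else acc) a) ≠ "" :=
      h _ (pvFoldl_mem t a)
    simp [pvOptList, pvBest, hm]

-- ===== VERDICT (by name: the statement is the Claim_ definition above) =====
theorem classify_barcodes_spec : Claim_equal_classify_barcodes := by
  intro barcodes _
  unfold Spec_classify_barcodes classify_barcodes classify_barcodes_alt
  rw [pvLoopA_spec]
  dsimp only
  simp only [List.nil_append]
  have hP : ∀ v ∈ (pvVals barcodes).filter (fun v => pvTag v = "P"), v ≠ "" := by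
    intro v hv
    exact pvTag_ne_empty v "P" (of_decide_eq_true (List.mem_filter.mp hv).2) (by decide)
  have hQ : ∀ v ∈ (pvVals barcodes).filter (fun v => pvTag v = "Q"), v ≠ "" := by
    intro v hv
    exact pvTag_ne_empty v "Q" (of_decide_eq_true (List.mem_filter.mp hv).2) (by decide)
  rw [pvOptList_foldMax _ hP, pvOptList_foldMax _ hQ]
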